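-- pv_equiv track=rewrite | github.com/TexV2/Database_technique_Project | BackEnd/main_helper.py | sanitize_input
-- ===== SOURCE A (Python) =====
-- def sanitize_input(inp):
--     inp = inp.strip()
--     banned_symbols = [";", "'", '"', "`", "#", "=", "%", "@", "(", ")"]
--     last_char = ""
--     for char in inp:
--         if char in banned_symbols or (last_char+char) in ["/*", "*/", "--"]:
--             return False
--         last_char = char
--     return True
-- ===== SOURCE B (Python) =====
-- def sanitize_input(inp):
--     inp = inp.strip()
--     banned_symbols = ";'\"`#=%@()"
--     if any(c in banned_symbols for c in inp):
--         return False
--     for seq in ("/*", "*/", "--"):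
--         if seq in inp:
--             return False
--     return True
-- ===== Notes on version B (the rewrite author's own statement) =====
-- stated objective: simpler
-- what changed: Replaced the single stateful pass with a last_char accumulator by independent whole-string checks: one banned-character scan plus three substring-containment tests.
import Mathlib
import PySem

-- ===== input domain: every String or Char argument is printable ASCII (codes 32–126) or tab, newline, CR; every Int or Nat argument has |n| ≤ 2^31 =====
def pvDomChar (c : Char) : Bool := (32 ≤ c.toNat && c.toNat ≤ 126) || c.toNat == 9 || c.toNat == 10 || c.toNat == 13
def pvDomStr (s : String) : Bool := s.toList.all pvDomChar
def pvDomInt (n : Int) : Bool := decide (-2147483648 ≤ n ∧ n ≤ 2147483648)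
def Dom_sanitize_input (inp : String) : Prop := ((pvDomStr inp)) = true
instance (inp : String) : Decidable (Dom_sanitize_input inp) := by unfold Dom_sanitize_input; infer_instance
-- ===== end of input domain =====

-- B replaces A's single stateful last_char pass by independent whole-string checks
-- (one banned-character scan, then three substring tests); objective: simpler.

-- ===== PORT A =====
def pvBanned : List Char := [';', '\'', '"', '`', '#', '=', '%', '@', '(', ')']
def pvSeqs : List (List Char) := [['/', '*'], ['*', '/'], ['-', '-']]

-- A's for-loop with early return and the last_char accumulator
def pvGoA : List Char → List Char → Bool
  | [], _ => true
  | c :: rest, last =>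
    if c ∈ pvBanned ∨ (last ++ [c]) ∈ pvSeqs then false
    else pvGoA rest [c]

def sanitize_input (inp : String) : Bool :=
  pvGoA (PySem.Str.strip inp).toList []

-- ===== PORT B =====
def sanitize_input_alt (inp : String) : Bool :=
  let s := PySem.Str.strip inp
  if s.toList.any (fun c => c ∈ pvBanned) then false
  else if (["/*", "*/", "--"] : List String).any (fun q => PySem.Str.isIn q s) then false
  else true

-- ===== PRECONDITION & SPEC =====
def Spec_sanitize_input (inp : String) (out : Bool) : Prop := out = sanitize_input_alt inp
instance (inp : String) (out : Bool) : Decidable (Spec_sanitize_input inp out) := by unfold Spec_sanitize_input; infer_instance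

-- ===== CLAIM (what is proved, stated in full; the proofs are below) =====
def Claim_equal_sanitize_input : Prop := ∀ (inp : String), Dom_sanitize_input inp → Spec_sanitize_input inp (sanitize_input inp)

-- ===== LEMMAS AND PROOFS =====

-- A's scan succeeds iff no char is banned and no banned 2-char sequence is an infix
lemma pvGoA_spec (cs : List Char) (last : List Char) (h : last.length ≤ 1) :
    pvGoA cs last = true ↔ ((∀ c ∈ cs, c ∉ pvBanned) ∧ ∀ q ∈ pvSeqs, ¬ q <:+: (last ++ cs)) := by
  induction cs generalizing last with
  | nil =>
    simp [pvGoA]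
    intro q hq hinf
    have hl := hinf.length_le
    fin_cases hq <;> simp_all <;> omega
  | cons c rest ih =>
    simp only [pvGoA]
    by_cases hb : c ∈ pvBanned ∨ (last ++ [c]) ∈ pvSeqs
    · rw [if_pos hb]
      simp only [Bool.false_eq_true, false_iff]
      rintro ⟨h1, h2⟩
      rcases hb with hb | hb
      · exact h1 c (by simp) hb
      · exact h2 _ hb ⟨[], rest, by simp⟩
    · rw [if_neg hb]
      rw [not_or] at hb
      obtain ⟨hb1, hb2⟩ := hb
      rw [ih [c] (by simp)]
      have hlast : last = [] ∨ ∃ x, last = [x] := by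
        rcases last with _ | ⟨x, _ | _⟩ <;> simp_all
      constructor
      · rintro ⟨h1, h2⟩
        refine ⟨?_, ?_⟩
        · intro d hd
          rcases List.mem_cons.mp hd with rfl | hd
          · exact hb1
          · exact h1 d hd
        · intro q hq hinf
          rcases hlast with rfl | ⟨x, rfl⟩
          · exact h2 q hq (by simpa using hinf)
          · rcases List.infix_cons_iff.mp (by simpa using hinf) with hpre | hinf'
            · -- a 2-char prefix of x :: c :: rest must be [x, c], excluded by hb2
              have hq2 : q.length = 2 := by fin_cases hq <;> rfl
              obtain ⟨t, ht⟩ := hpre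
              rcases q with _ | ⟨a, _ | ⟨b, _ | _⟩⟩ <;> simp_all
            · exact h2 q hq (by simpa using hinf')
      · rintro ⟨h1, h2⟩
        refine ⟨fun d hd => h1 d (by simp [hd]), ?_⟩
        intro q hq hinf
        apply h2 q hq
        obtain ⟨s1, s2, hs⟩ := hinf
        refine ⟨last ++ s1, s2, ?_⟩
        simp only [List.append_assoc]
        congr 1
        simpa [List.append_assoc] using hs

lemma alt_spec (inp : String) :
    sanitize_input_alt inp = true ↔
      ((∀ c ∈ (PySem.Str.strip inp).toList, c ∉ pvBanned) ∧
        ∀ q ∈ pvSeqs, ¬ q <:+: (PySem.Str.strip inp).toList) := by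
  unfold sanitize_input_alt
  set s := PySem.Str.strip inp with hs
  by_cases h1 : (s.toList.any fun c => decide (c ∈ pvBanned)) = true
  · rw [if_pos h1]
    simp only [Bool.false_eq_true, false_iff]
    rintro ⟨ha, -⟩
    simp only [List.any_eq_true, decide_eq_true_eq] at h1
    obtain ⟨c, hc, hcb⟩ := h1
    exact ha c hc hcb
  · rw [if_neg h1]
    simp only [List.any_eq_true, decide_eq_true_eq, not_exists, not_and] at h1
    by_cases h2 : ((["/*", "*/", "--"] : List String).any fun q => PySem.Str.isIn q s) = true
    · rw [if_pos h2]
      simp only [Bool.false_eq_true, false_iff]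
      rintro ⟨-, hq⟩
      simp only [List.any_eq_true, List.mem_cons] at h2
      obtain ⟨q, hqm, hqin⟩ := h2
      have hinf := (PySem.Str.isIn_iff_infix q s).mp hqin
      rcases hqm with rfl | rfl | rfl | hfalse
      · exact hq ['/', '*'] (by simp [pvSeqs]) hinf
      · exact hq ['*', '/'] (by simp [pvSeqs]) hinf
      · exact hq ['-', '-'] (by simp [pvSeqs]) hinf
      · simp at hfalse
    · rw [if_neg h2]
      simp only [true_iff]
      refine ⟨fun c hc => h1 c hc, ?_⟩
      intro q hq hinf
      apply h2
      simp only [List.any_eq_true]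
      fin_cases hq
      · exact ⟨"/*", by simp, (PySem.Str.isIn_iff_infix _ _).mpr hinf⟩
      · exact ⟨"*/", by simp, (PySem.Str.isIn_iff_infix _ _).mpr hinf⟩
      · exact ⟨"--", by simp, (PySem.Str.isIn_iff_infix _ _).mpr hinf⟩

-- ===== VERDICT (by name: the statement is the Claim_ definition above) =====
theorem sanitize_input_spec : Claim_equal_sanitize_input := by
  intro inp _
  unfold Spec_sanitize_input
  have hA := pvGoA_spec (PySem.Str.strip inp).toList [] (by simp)
  have hB := alt_spec inp
  simp only [List.nil_append] at hA
  apply Bool.coe_iff_coe.mp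
  rw [show (sanitize_input inp = true) = (pvGoA (PySem.Str.strip inp).toList [] = true) from rfl]
  rw [hA, hB]
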